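-- pv_equiv track=rewrite | github.com/YuHyeonGeun-KOR/My-Algorithm-Journey | Programmers/weeklyChallenge/week_4.py | solution
-- ===== SOURCE A (Python) =====
-- def solution(table, languages, preference):
--     answer = ''
--     company_tables={}
--     comName = []
--     for company in table:
--         com_list = company.split()
--
--         rank = {}
--         comName.append(com_list[0])
--         s_set = 5
--         for i in range(1,len(com_list)):
--             rank[com_list[i]] = s_set
--             s_set-=1
--         company_tables[comName[-1]] = rank
--
--     result = {}
--     for company_table in company_tables:
--         idx =0
--         score_sum = 0
--
--         for i in range(len(languages)):
--             if languages[i] in company_tables[company_table]: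
--                 score_sum += preference[i] * company_tables[company_table][languages[i]]
--         idx +=1
--         result[company_table] = score_sum
--
--     result= sorted(result , key = lambda x : (-result[x],x))
--
--     return result[0]
-- ===== SOURCE B (Python) =====
-- def solution(table, languages, preference):
--     # Global language -> total preference index (duplicate languages sum),
--     # so each company is scored by walking its own few ranked languages
--     # instead of rescanning the whole languages list.
--     pref_map = {}
--     for lang, p in zip(languages, preference):
--         pref_map[lang] = pref_map.get(lang, 0) + p
--     scores = {}
--     for row in table:
--         tokens = row.split()
--         name = tokens[0]
--         rank = {}
--         for d, lang in enumerate(tokens[1:]):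
--             rank[lang] = 5 - d
--         scores[name] = sum(r * pref_map.get(lang, 0) for lang, r in rank.items())
--     return sorted(scores, key=lambda name: (-scores[name], name))[0]
-- ===== Notes on version B (the rewrite author's own statement) =====
-- stated objective: faster
-- what changed: B builds one global language-to-summed-preference dict once and scores each company by walking only its own (at most five) ranked languages, instead of A's rescan of the whole languages list per company; the winner is still picked by the same (-score, name) sort.
import Mathlib
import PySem

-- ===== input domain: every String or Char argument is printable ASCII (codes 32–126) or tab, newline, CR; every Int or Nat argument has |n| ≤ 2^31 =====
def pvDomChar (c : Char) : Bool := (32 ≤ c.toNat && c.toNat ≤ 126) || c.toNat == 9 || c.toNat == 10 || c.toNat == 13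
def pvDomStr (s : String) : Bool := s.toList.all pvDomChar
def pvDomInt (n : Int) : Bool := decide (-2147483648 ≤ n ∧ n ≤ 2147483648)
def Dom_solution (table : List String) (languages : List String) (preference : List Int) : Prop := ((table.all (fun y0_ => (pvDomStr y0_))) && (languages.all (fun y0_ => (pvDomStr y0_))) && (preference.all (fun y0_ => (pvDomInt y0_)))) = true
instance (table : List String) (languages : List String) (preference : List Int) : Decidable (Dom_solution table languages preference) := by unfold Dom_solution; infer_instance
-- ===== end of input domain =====

-- B replaces A's per-company scan of the whole languages list by one global
-- language→summed-preference index and a per-company walk over its own ranked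
-- languages (return value only; neither program mutates its arguments).

-- ===== PORT A =====
def solution (table : List String) (languages : List String) (preference : List Int) : String :=
  let st := table.foldl
    (fun (st : PySem.Dict String (PySem.Dict String Int) × List String) company =>
      let com_list := PySem.Str.split₀ company
      let comName := st.2 ++ [PySem.List.pyGetD com_list 0 ""]
      let rs := (PySem.List.pyRange 1 (com_list.length : Int)).foldl
          (fun (rs : PySem.Dict String Int × Int) i =>
            (rs.1.insert (PySem.List.pyGetD com_list i "") rs.2, rs.2 - 1))
          ((PySem.Dict.empty : PySem.Dict String Int), 5)
      (st.1.insert (PySem.List.pyGetD comName (-1) "") rs.1, comName))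
    ((PySem.Dict.empty : PySem.Dict String (PySem.Dict String Int)), [])
  let company_tables := st.1
  let result := company_tables.keys.foldl
    (fun (res : PySem.Dict String Int) company_table =>
      let score_sum := (PySem.List.pyRange 0 (languages.length : Int)).foldl
        (fun s i =>
          if (company_tables.getD company_table PySem.Dict.empty).contains
               (PySem.List.pyGetD languages i "") then
            s + PySem.List.pyGetD preference i 0 *
                (company_tables.getD company_table PySem.Dict.empty).getD
                  (PySem.List.pyGetD languages i "") 0
          else s)
        0
      res.insert company_table score_sum)
    (PySem.Dict.empty : PySem.Dict String Int)
  PySem.List.pyGetD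
    (PySem.List.sorted2 result.keys (fun x => -(result.getD x 0)) (fun x => x) false) 0 ""

-- ===== PORT B =====
def solution_alt (table : List String) (languages : List String) (preference : List Int) : String :=
  let prefMap := (languages.zip preference).foldl
      (fun (d : PySem.Dict String Int) lp => d.insert lp.1 (d.getD lp.1 0 + lp.2))
      PySem.Dict.empty
  let scores := table.foldl
    (fun (sc : PySem.Dict String Int) row =>
      let tokens := PySem.Str.split₀ row
      let name := PySem.List.pyGetD tokens 0 ""
      let rank := (PySem.List.enumerate (tokens.drop 1)).foldl
          (fun (r : PySem.Dict String Int) dl => r.insert dl.2 (5 - dl.1))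
          PySem.Dict.empty
      sc.insert name ((rank.items.map (fun lr => lr.2 * prefMap.getD lr.1 0)).sum))
    (PySem.Dict.empty : PySem.Dict String Int)
  PySem.List.pyGetD
    (PySem.List.sorted2 scores.keys (fun n => -(scores.getD n 0)) (fun n => n) false) 0 ""

-- ===== PRECONDITION & SPEC =====
-- Pre_ excludes exactly the inputs where Python A raises: an empty table and
-- whitespace-only rows (IndexError on [0]), and a language at an index beyond
-- len(preference) that occurs among some row's ranked tokens (IndexError on
-- preference[i]).
def Pre_solution (table : List String) (languages : List String) (preference : List Int) : Prop :=
  table ≠ [] ∧ (∀ row ∈ table, PySem.Str.split₀ row ≠ []) ∧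
  (∀ i < languages.length, preference.length ≤ i →
     ∀ row ∈ table, languages.getD i "" ∉ (PySem.Str.split₀ row).drop 1)
instance (table : List String) (languages : List String) (preference : List Int) : Decidable (Pre_solution table languages preference) := by unfold Pre_solution; infer_instance
def pvWitness_solution : List String × List String × List Int :=
  (["acompany java python", "bcompany python ruby"], ["python", "ruby"], [5, 3])
def Spec_solution (table : List String) (languages : List String) (preference : List Int) (out : String) : Prop := out = solution_alt table languages preference
instance (table : List String) (languages : List String) (preference : List Int) (out : String) : Decidable (Spec_solution table languages preference out) := by unfold Spec_solution; infer_instance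

-- ===== CLAIM (what is proved, stated in full; the proofs are below) =====
def Claim_equal_solution : Prop := ∀ (table : List String) (languages : List String) (preference : List Int), Dom_solution table languages preference → Pre_solution table languages preference → Spec_solution table languages preference (solution table languages preference)

-- ===== LEMMAS AND PROOFS =====

-- proof-side names for the pieces of the two ports
def rankA (toks : List String) : PySem.Dict String Int :=
  ((PySem.List.pyRange 1 (toks.length : Int)).foldl
      (fun (rs : PySem.Dict String Int × Int) i =>
        (rs.1.insert (PySem.List.pyGetD toks i "") rs.2, rs.2 - 1))
      ((PySem.Dict.empty : PySem.Dict String Int), 5)).1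

def rankB (ts : List String) : PySem.Dict String Int :=
  (PySem.List.enumerate ts).foldl
    (fun (r : PySem.Dict String Int) dl => r.insert dl.2 (5 - dl.1)) PySem.Dict.empty

def pmOf (zl : List (String × Int)) : PySem.Dict String Int :=
  zl.foldl (fun (d : PySem.Dict String Int) lp => d.insert lp.1 (d.getD lp.1 0 + lp.2))
    PySem.Dict.empty

def scoreA (languages : List String) (preference : List Int) (r : PySem.Dict String Int) : Int :=
  (PySem.List.pyRange 0 (languages.length : Int)).foldl
    (fun s i =>
      if r.contains (PySem.List.pyGetD languages i "") then
        s + PySem.List.pyGetD preference i 0 * r.getD (PySem.List.pyGetD languages i "") 0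
      else s)
    0

def scoreB (pm r : PySem.Dict String Int) : Int :=
  (r.items.map (fun lr => lr.2 * pm.getD lr.1 0)).sum

def ctA (table : List String) : PySem.Dict String (PySem.Dict String Int) :=
  (table.foldl
    (fun (st : PySem.Dict String (PySem.Dict String Int) × List String) company =>
      let com_list := PySem.Str.split₀ company
      let comName := st.2 ++ [PySem.List.pyGetD com_list 0 ""]
      let rs := (PySem.List.pyRange 1 (com_list.length : Int)).foldl
          (fun (rs : PySem.Dict String Int × Int) i =>
            (rs.1.insert (PySem.List.pyGetD com_list i "") rs.2, rs.2 - 1))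
          ((PySem.Dict.empty : PySem.Dict String Int), 5)
      (st.1.insert (PySem.List.pyGetD comName (-1) "") rs.1, comName))
    ((PySem.Dict.empty : PySem.Dict String (PySem.Dict String Int)), [])).1

def resultOf (languages : List String) (preference : List Int)
    (ct : PySem.Dict String (PySem.Dict String Int)) : PySem.Dict String Int :=
  ct.keys.foldl
    (fun (res : PySem.Dict String Int) n =>
      res.insert n (scoreA languages preference (ct.getD n PySem.Dict.empty)))
    PySem.Dict.empty

def resB (languages : List String) (preference : List Int) (table : List String) :
    PySem.Dict String Int :=
  table.foldl
    (fun (sc : PySem.Dict String Int) row =>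
      sc.insert (PySem.List.pyGetD (PySem.Str.split₀ row) 0 "")
        (scoreB (pmOf (languages.zip preference)) (rankB ((PySem.Str.split₀ row).drop 1))))
    PySem.Dict.empty

theorem solutionA_eq (table languages : List String) (preference : List Int) :
    solution table languages preference =
      PySem.List.pyGetD
        (PySem.List.sorted2 (resultOf languages preference (ctA table)).keys
          (fun x => -((resultOf languages preference (ctA table)).getD x 0)) (fun x => x) false)
        0 "" := rfl

theorem solutionB_eq (table languages : List String) (preference : List Int) :
    solution_alt table languages preference =
      PySem.List.pyGetD
        (PySem.List.sorted2 (resB languages preference table).keys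
          (fun x => -((resB languages preference table).getD x 0)) (fun x => x) false)
        0 "" := rfl

theorem ctA_gen (table : List String) :
    ∀ (ct : PySem.Dict String (PySem.Dict String Int)) (cn : List String),
    (table.foldl
      (fun (st : PySem.Dict String (PySem.Dict String Int) × List String) company =>
        let com_list := PySem.Str.split₀ company
        let comName := st.2 ++ [PySem.List.pyGetD com_list 0 ""]
        let rs := (PySem.List.pyRange 1 (com_list.length : Int)).foldl
            (fun (rs : PySem.Dict String Int × Int) i =>
              (rs.1.insert (PySem.List.pyGetD com_list i "") rs.2, rs.2 - 1))
            ((PySem.Dict.empty : PySem.Dict String Int), 5)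
        (st.1.insert (PySem.List.pyGetD comName (-1) "") rs.1, comName))
      (ct, cn)).1
    = table.foldl
        (fun ct row =>
          ct.insert (PySem.List.pyGetD (PySem.Str.split₀ row) 0 "") (rankA (PySem.Str.split₀ row)))
        ct := by
  induction table with
  | nil => intro ct cn; rfl
  | cons row t ih =>
      intro ct cn
      simp only [List.foldl_cons]
      rw [ih]
      simp only [PySem.List.pyGetD_neg_one_append_singleton]
      rfl

theorem ctA_eq (table : List String) :
    ctA table = table.foldl
      (fun ct row =>
        ct.insert (PySem.List.pyGetD (PySem.Str.split₀ row) 0 "") (rankA (PySem.Str.split₀ row)))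
      PySem.Dict.empty := by
  unfold ctA
  exact ctA_gen table PySem.Dict.empty []

theorem ctA_append (table : List String) (row : String) :
    ctA (table ++ [row]) = (ctA table).insert
      (PySem.List.pyGetD (PySem.Str.split₀ row) 0 "") (rankA (PySem.Str.split₀ row)) := by
  rw [ctA_eq, ctA_eq, List.foldl_append]
  rfl

theorem enumerate_append_singleton {α : Type} (l : List α) (x : α) (s : Int) :
    PySem.List.enumerate (l ++ [x]) s = PySem.List.enumerate l s ++ [((s + l.length : Int), x)] := by
  induction l generalizing s with
  | nil => simp [PySem.List.enumerate]
  | cons h t ih => simp [PySem.List.enumerate, ih]; ring_nf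

theorem map_snd_enumerate {α : Type} (l : List α) (s : Int) :
    (PySem.List.enumerate l s).map Prod.snd = l := by
  induction l generalizing s with
  | nil => rfl
  | cons h t ih => simp [PySem.List.enumerate, ih]

theorem rank_pair (h : String) (ts : List String) :
    ((PySem.List.pyRange 1 (((h :: ts).length : Nat) : Int)).foldl
        (fun (rs : PySem.Dict String Int × Int) i =>
          (rs.1.insert (PySem.List.pyGetD (h :: ts) i "") rs.2, rs.2 - 1))
        ((PySem.Dict.empty : PySem.Dict String Int), 5))
      = (rankB ts, 5 - (ts.length : Int)) := by
  induction ts using List.reverseRecOn with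
  | nil => rfl
  | append_singleton ts t ih =>
      have hlen : (((h :: (ts ++ [t])).length : Nat) : Int) = ((ts.length + 1 : Nat) : Int) + 1 := by
        simp only [List.length_cons, List.length_append, List.length_nil]; push_cast; ring
      rw [hlen, PySem.List.pyRange_one_succ_right (by push_cast; omega), List.foldl_append]
      have hcongr : (PySem.List.pyRange 1 ((ts.length + 1 : Nat) : Int)).foldl
          (fun (rs : PySem.Dict String Int × Int) i =>
            (rs.1.insert (PySem.List.pyGetD (h :: (ts ++ [t])) i "") rs.2, rs.2 - 1))
          ((PySem.Dict.empty : PySem.Dict String Int), 5)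
        = (PySem.List.pyRange 1 ((ts.length + 1 : Nat) : Int)).foldl
          (fun (rs : PySem.Dict String Int × Int) i =>
            (rs.1.insert (PySem.List.pyGetD (h :: ts) i "") rs.2, rs.2 - 1))
          ((PySem.Dict.empty : PySem.Dict String Int), 5) := by
        apply PySem.List.foldl_congr_mem
        intro acc x hx
        rw [PySem.List.mem_pyRange_one] at hx
        obtain ⟨n, rfl⟩ : ∃ n : Nat, x = (n : Int) := ⟨x.toNat, by omega⟩
        have hn : n < (h :: ts).length := by simp; omega
        have : PySem.List.pyGetD (h :: (ts ++ [t])) (n : Int) "" =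
            PySem.List.pyGetD (h :: ts) (n : Int) "" := by
          rw [PySem.List.pyGetD_natCast, PySem.List.pyGetD_natCast,
            show h :: (ts ++ [t]) = (h :: ts) ++ [t] by simp,
            List.getD_append _ _ _ _ hn]
        rw [this]
      rw [hcongr]
      have hlen' : (((h :: ts).length : Nat) : Int) = ((ts.length + 1 : Nat) : Int) := by simp
      rw [← hlen', ih]
      have hget : PySem.List.pyGetD (h :: (ts ++ [t])) (((h :: ts).length : Nat) : Int) "" = t := by
        rw [PySem.List.pyGetD_natCast, show h :: (ts ++ [t]) = (h :: ts) ++ [t] by simp]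
        simp [List.getD]
      simp only [List.foldl_cons, List.foldl_nil, hget]
      unfold rankB
      rw [enumerate_append_singleton, List.foldl_append]
      simp only [List.foldl_cons, List.foldl_nil, zero_add]
      refine Prod.ext ?_ ?_
      · rfl
      · simp; ring

theorem rank_eq (toks : List String) : rankA toks = rankB (toks.drop 1) := by
  cases toks with
  | nil => rfl
  | cons h ts =>
      unfold rankA
      have := congrArg Prod.fst (rank_pair h ts)
      simpa using this

theorem rankB_keys_nodup (ts : List String) : (rankB ts).keys.Nodup := by
  unfold rankB
  exact PySem.Dict.nodup_keys_foldl_insert_key (PySem.List.enumerate ts) (fun dl => dl.2)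
    (fun r dl => 5 - dl.1) PySem.Dict.empty (by simp [PySem.Dict.keys_empty])

theorem rankB_keys_sub (ts : List String) : ∀ x ∈ (rankB ts).keys, x ∈ ts := by
  intro x hx
  unfold rankB at hx
  rw [PySem.Dict.keys_foldl_insert_key (PySem.List.enumerate ts) (fun dl => dl.2)
    (fun r dl => 5 - dl.1) PySem.Dict.empty] at hx
  rw [show (PySem.List.enumerate ts).map (fun dl => dl.2) = ts from map_snd_enumerate ts 0] at hx
  rcases (PySem.Set.mem_update _ _ _).1 hx with h | h
  · simp [PySem.Dict.keys_empty] at h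
  · exact h

theorem sum_if_of_mem (il : List (String × Int)) (l : String) (v : Int)
    (hnd : (il.map Prod.fst).Nodup) (hmem : (l, v) ∈ il) :
    (il.map (fun q => if q.1 = l then q.2 else 0)).sum = v := by
  induction il with
  | nil => cases hmem
  | cons q rest ih =>
      simp only [List.map_cons, List.nodup_cons] at hnd
      rcases List.mem_cons.1 hmem with h | h
      · subst h
        simp only [List.map_cons, List.sum_cons, if_pos]
        have : ((rest.map (fun q => if q.1 = l then q.2 else 0)).sum = 0) := by
          apply List.sum_eq_zero
          intro x hx
          rcases List.mem_map.1 hx with ⟨p, hp, rfl⟩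
          have : p.1 ≠ l := by
            intro he
            exact hnd.1 (List.mem_map.2 ⟨p, hp, he⟩)
          simp [this]
        simp [this]
      · have hne : q.1 ≠ l := by
          intro he
          exact hnd.1 (he ▸ List.mem_map.2 ⟨(l, v), h, rfl⟩)
        simp only [List.map_cons, List.sum_cons, if_neg hne, zero_add]
        exact ih hnd.2 h

-- sum of the if-column of an items list with nodup keys
theorem sum_if_items (r : PySem.Dict String Int) (hnd : r.keys.Nodup) (l : String) :
    (r.items.map (fun q => if q.1 = l then q.2 else 0)).sum =
      if r.contains l then r.getD l 0 else 0 := by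
  have hkeys : r.keys = r.items.map Prod.fst := rfl
  by_cases hc : r.contains l = true
  · rw [if_pos hc]
    have h2 : (r.get? l).isSome = true := by
      rw [← PySem.Dict.contains_eq_isSome_get? r l]; exact hc
    rcases Option.isSome_iff_exists.1 h2 with ⟨v, hv⟩
    rw [PySem.Dict.getD_eq_get?_getD, hv]
    exact sum_if_of_mem r.items l v (hkeys ▸ hnd) (PySem.Dict.mem_items_of_get?_eq_some r hv)
  · rw [if_neg hc]
    apply List.sum_eq_zero
    intro x hx
    rcases List.mem_map.1 hx with ⟨p, hp, rfl⟩
    have : p.1 ≠ l := by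
      intro he
      apply hc
      rw [PySem.Dict.contains_eq_decide_mem_keys, decide_eq_true_eq, hkeys]
      exact List.mem_map.2 ⟨p, hp, he⟩
    simp [this]

theorem sum_insert_delta (il : List (String × Int)) (d : PySem.Dict String Int) (l : String) (p : Int) :
    (il.map (fun q => q.2 * (d.insert l (d.getD l 0 + p)).getD q.1 0)).sum =
      (il.map (fun q => q.2 * d.getD q.1 0)).sum +
      (il.map (fun q => if q.1 = l then q.2 else 0)).sum * p := by
  induction il with
  | nil => simp
  | cons q rest ih =>
      simp only [List.map_cons, List.sum_cons]
      rw [ih, PySem.Dict.getD_insert]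
      by_cases he : q.1 = l
      · subst he; simp; ring
      · rw [if_neg he, if_neg he]; ring

theorem pmOf_append_singleton (zl : List (String × Int)) (e : String × Int) :
    pmOf (zl ++ [e]) = (pmOf zl).insert e.1 ((pmOf zl).getD e.1 0 + e.2) := by
  unfold pmOf
  rw [List.foldl_append]
  rfl

theorem score_zip (zl : List (String × Int)) (r : PySem.Dict String Int) (hnd : r.keys.Nodup) :
    (zl.map (fun e => if r.contains e.1 then e.2 * r.getD e.1 0 else 0)).sum =
      scoreB (pmOf zl) r := by
  induction zl using List.reverseRecOn with
  | nil =>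
      unfold scoreB pmOf
      simp [PySem.Dict.getD_empty]
  | append_singleton zl e ih =>
      rw [List.map_append, List.sum_append, ih]
      unfold scoreB
      rw [pmOf_append_singleton, sum_insert_delta, sum_if_items r hnd]
      by_cases hc : r.contains e.1 = true
      · simp only [hc, if_true, List.map_cons, List.map_nil, List.sum_cons, List.sum_nil]
        ring
      · simp only [Bool.not_eq_true] at hc
        simp only [hc, Bool.false_eq_true, if_false, List.map_cons, List.map_nil,
          List.sum_cons, List.sum_nil]
        ring

theorem sum_range_eq_zip (l : List String) (p : List Int) (r : PySem.Dict String Int)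
    (hc : ∀ i < l.length, p.length ≤ i → r.contains (l.getD i "") = false) :
    ((List.range l.length).map
        (fun n => if r.contains (l.getD n "") then p.getD n 0 * r.getD (l.getD n "") 0 else 0)).sum
      = ((l.zip p).map (fun e => if r.contains e.1 then e.2 * r.getD e.1 0 else 0)).sum := by
  have hmz : (l.zip p).length = min l.length p.length := List.length_zip
  have hm : min l.length p.length ≤ l.length := Nat.min_le_left _ _
  rw [show l.length = min l.length p.length + (l.length - min l.length p.length) by omega,
    List.range_add, List.map_append, List.sum_append]
  have hzero : ((List.map (fun x => min l.length p.length + x)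
      (List.range (l.length - min l.length p.length))).map
        (fun n => if r.contains (l.getD n "") then p.getD n 0 * r.getD (l.getD n "") 0 else 0)).sum = 0 := by
    apply List.sum_eq_zero
    intro y hy
    rcases List.mem_map.1 hy with ⟨n, hn, rfl⟩
    rcases List.mem_map.1 hn with ⟨x, hx, rfl⟩
    have hxlt := List.mem_range.1 hx
    have h1 : min l.length p.length + x < l.length := by omega
    have h2 : p.length ≤ min l.length p.length + x := by omega
    rw [hc _ h1 h2]
    simp
  rw [hzero, add_zero]
  have hlist : (List.range (min l.length p.length)).map
      (fun n => if r.contains (l.getD n "") then p.getD n 0 * r.getD (l.getD n "") 0 else 0)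
      = (l.zip p).map (fun e => if r.contains e.1 then e.2 * r.getD e.1 0 else 0) := by
    apply List.ext_getElem
    · simp [hmz]
    · intro j h1 h2
      simp only [List.getElem_map, List.getElem_range]
      have hj : j < min l.length p.length := by simpa using h1
      have hjl : j < l.length := by omega
      have hjp : j < p.length := by omega
      rw [List.getElem_zip, List.getD_eq_getElem l "" hjl, List.getD_eq_getElem p 0 hjp]
  rw [hlist]

theorem scoreA_eq_scoreB (languages : List String) (preference : List Int)
    (r : PySem.Dict String Int) (hnd : r.keys.Nodup)
    (hc : ∀ i < languages.length, preference.length ≤ i →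
            r.contains (languages.getD i "") = false) :
    scoreA languages preference r = scoreB (pmOf (languages.zip preference)) r := by
  unfold scoreA
  rw [PySem.List.foldl_congr_mem _ _
    (fun (s : Int) (i : Int) => s +
      (if r.contains (PySem.List.pyGetD languages i "") then
        PySem.List.pyGetD preference i 0 * r.getD (PySem.List.pyGetD languages i "") 0
      else 0)) 0
    (by intro acc x _; dsimp only; split_ifs <;> ring)]
  rw [PySem.List.foldl_add, PySem.List.pyRange_zero_natCast, List.map_map, zero_add]
  have hmapeq : (List.range languages.length).map
      ((fun i => if r.contains (PySem.List.pyGetD languages i "") then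
          PySem.List.pyGetD preference i 0 * r.getD (PySem.List.pyGetD languages i "") 0
        else 0) ∘ (fun (k : Nat) => (k : Int)))
      = (List.range languages.length).map
        (fun n => if r.contains (languages.getD n "") then
            preference.getD n 0 * r.getD (languages.getD n "") 0 else 0) := by
    apply List.map_congr_left
    intro n _
    simp [PySem.List.pyGetD_natCast]
  rw [hmapeq, sum_range_eq_zip languages preference r hc]
  exact score_zip (languages.zip preference) r hnd

theorem items_resultOf (languages : List String) (preference : List Int)
    (ct : PySem.Dict String (PySem.Dict String Int)) (hnd : ct.keys.Nodup) :
    (resultOf languages preference ct).items =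
      ct.keys.map (fun n => (n, scoreA languages preference (ct.getD n PySem.Dict.empty))) := by
  unfold resultOf
  rw [PySem.Dict.items_foldl_insert_fresh ct.keys (fun n => n)
    (fun n => scoreA languages preference (ct.getD n PySem.Dict.empty)) PySem.Dict.empty
    (by intro a _; exact PySem.Dict.contains_empty a) (by simpa using hnd)]
  rfl

theorem keys_resultOf (languages : List String) (preference : List Int)
    (ct : PySem.Dict String (PySem.Dict String Int)) (hnd : ct.keys.Nodup) :
    (resultOf languages preference ct).keys = ct.keys := by
  have h : (resultOf languages preference ct).keys =
      (resultOf languages preference ct).items.map Prod.fst := rfl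
  rw [h, items_resultOf languages preference ct hnd, List.map_map]
  exact List.map_id ct.keys

theorem resultOf_insert (languages : List String) (preference : List Int)
    (ct : PySem.Dict String (PySem.Dict String Int)) (hnd : ct.keys.Nodup)
    (n : String) (rk : PySem.Dict String Int) :
    resultOf languages preference (ct.insert n rk) =
      (resultOf languages preference ct).insert n (scoreA languages preference rk) := by
  apply PySem.Dict.ext
  by_cases hc : ct.contains n = true
  · have hkeys : (ct.insert n rk).keys = ct.keys := PySem.Dict.keys_insert_of_contains ct rk hc
    have hmem : n ∈ ct.keys := by
      rw [PySem.Dict.contains_eq_decide_mem_keys] at hc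
      exact of_decide_eq_true hc
    have hc' : (resultOf languages preference ct).contains n = true := by
      rw [PySem.Dict.contains_eq_decide_mem_keys, keys_resultOf languages preference ct hnd]
      exact decide_eq_true hmem
    rw [items_resultOf languages preference _ (hkeys ▸ hnd),
      PySem.Dict.items_insert_of_contains _ _ hc',
      items_resultOf languages preference ct hnd, List.map_map, hkeys]
    apply List.map_congr_left
    intro m _
    by_cases he : m = n
    · subst he
      simp
    · simp [PySem.Dict.getD_insert, he, Function.comp]
  · have hcf : ct.contains n = false := by simpa using hc
    have hkeys : (ct.insert n rk).keys = ct.keys ++ [n] :=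
      PySem.Dict.keys_insert_of_not_contains ct rk hcf
    have hnmem : n ∉ ct.keys := by
      rw [PySem.Dict.contains_eq_decide_mem_keys] at hcf
      simpa using hcf
    have hnd' : (ct.insert n rk).keys.Nodup := by
      rw [hkeys]
      simp only [List.nodup_append, hnd, true_and]
      refine ⟨List.nodup_singleton n, ?_⟩
      intro a ha b hb
      rw [List.mem_singleton] at hb
      subst hb
      intro he
      exact hnmem (he ▸ ha)
    have hc' : (resultOf languages preference ct).contains n = false := by
      rw [PySem.Dict.contains_eq_decide_mem_keys, keys_resultOf languages preference ct hnd]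
      simpa using hnmem
    rw [items_resultOf languages preference _ hnd',
      PySem.Dict.items_insert_of_not_contains _ _ hc',
      items_resultOf languages preference ct hnd, hkeys, List.map_append]
    congr 1
    · apply List.map_congr_left
      intro m hm
      have : m ≠ n := fun he => hnmem (he ▸ hm)
      simp [PySem.Dict.getD_insert, this]
    · simp [PySem.Dict.getD_insert]

theorem ctA_keys_nodup (table : List String) : (ctA table).keys.Nodup := by
  rw [ctA_eq]
  exact PySem.Dict.nodup_keys_foldl_insert_key table
    (fun row => PySem.List.pyGetD (PySem.Str.split₀ row) 0 "")
    (fun ct row => rankA (PySem.Str.split₀ row)) PySem.Dict.empty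
    (by simp [PySem.Dict.keys_empty])

theorem result_eq (languages : List String) (preference : List Int) (table : List String)
    (hc : ∀ i < languages.length, preference.length ≤ i →
            ∀ row ∈ table, languages.getD i "" ∉ (PySem.Str.split₀ row).drop 1) :
    resultOf languages preference (ctA table) = resB languages preference table := by
  induction table using List.reverseRecOn with
  | nil => rfl
  | append_singleton table row ih =>
      have hc' : ∀ i < languages.length, preference.length ≤ i →
          ∀ r ∈ table, languages.getD i "" ∉ (PySem.Str.split₀ r).drop 1 := by
        intro i hi hp r hr
        exact hc i hi hp r (List.mem_append_left _ hr)
      have hrow := fun i hi hp => hc i hi hp row (List.mem_append_right _ (List.mem_singleton.2 rfl))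
      have hresB : resB languages preference (table ++ [row]) =
          (resB languages preference table).insert
            (PySem.List.pyGetD (PySem.Str.split₀ row) 0 "")
            (scoreB (pmOf (languages.zip preference))
              (rankB ((PySem.Str.split₀ row).drop 1))) := by
        unfold resB
        rw [List.foldl_append]
        rfl
      rw [ctA_append, resultOf_insert languages preference (ctA table) (ctA_keys_nodup table),
        ih hc', hresB, rank_eq]
      congr 1
      apply scoreA_eq_scoreB languages preference _ (rankB_keys_nodup _)
      intro i hi hp
      rw [PySem.Dict.contains_eq_decide_mem_keys, decide_eq_false_iff_not]
      intro hmem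
      exact hrow i hi hp (rankB_keys_sub _ _ hmem)

-- ===== VERDICT (by name: the statement is the Claim_ definition above) =====
theorem solution_spec : Claim_equal_solution := by
  intro table languages preference _hdom hpre
  unfold Spec_solution
  rw [solutionA_eq, solutionB_eq, result_eq languages preference table hpre.2.2]
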